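-- pv_equiv track=rewrite | github.com/Mao-beta/AtCoder | ADT_20231207_2I.py | area_min_sliding
-- ===== SOURCE A (Python) =====
-- from collections import deque, defaultdict, Counter
-- from collections import deque
--
-- def sliding_min(L, K):
--     """
--     Lの長さKの連続部分列それぞれの最小値のリストを返す
--     """
--     assert 1 <= K <= len(L)
--     res = []
--     D = deque()
--     for i, x in enumerate(L):
--         while D and L[D[-1]] >= x:
--             D.pop()
--         D.append(i) # L[i]がDの中で最大
--         while D and D[0] <= i-K:
--             D.popleft()
--         res.append(L[D[0]])
--     return res[K-1:]
--
-- def area_min_sliding(A, hl, wl):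
--     """
--     グリッド内の大きさ固定の各矩形の最小値を全体でO(HW)
--     最大値にしたいときは全部正負反転させてから使う
--     res[i][j] = min(A[i:i+hl, j:j+wl])
--
--     スライド最小値を取って転置してまた取って転置し直すとできる
--     """
--     res = []
--     for h, row in enumerate(A):
--         r = sliding_min(row, wl)
--         res.append(r)
--
--     res = [list(x) for x in zip(*res)]
--     for w, row in enumerate(res):
--         r = sliding_min(row, hl)
--         res[w] = r
--
--     res = [x for x in zip(*res)]
--     return res
-- ===== SOURCE B (Python) =====
-- def area_min_sliding(A, hl, wl):
--     """
--     グリッド内の大きさ固定の各矩形の最小値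
--     res[i][j] = min(A[i:i+hl, j:j+wl])
--     """
--     if not A:
--         return []
--     H = len(A)
--     W = min(len(row) for row in A)
--     assert 1 <= wl <= W and 1 <= hl <= H
--     return [tuple(min(A[i + di][j + dj] for di in range(hl) for dj in range(wl))
--                   for j in range(W - wl + 1))
--             for i in range(H - hl + 1)]
-- ===== Notes on version B (the rewrite author's own statement) =====
-- stated objective: simpler
-- what changed: Replaces the deque-based sliding-minimum passes with double transposition by a direct per-rectangle minimum computed in one nested comprehension.
import Mathlib
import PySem

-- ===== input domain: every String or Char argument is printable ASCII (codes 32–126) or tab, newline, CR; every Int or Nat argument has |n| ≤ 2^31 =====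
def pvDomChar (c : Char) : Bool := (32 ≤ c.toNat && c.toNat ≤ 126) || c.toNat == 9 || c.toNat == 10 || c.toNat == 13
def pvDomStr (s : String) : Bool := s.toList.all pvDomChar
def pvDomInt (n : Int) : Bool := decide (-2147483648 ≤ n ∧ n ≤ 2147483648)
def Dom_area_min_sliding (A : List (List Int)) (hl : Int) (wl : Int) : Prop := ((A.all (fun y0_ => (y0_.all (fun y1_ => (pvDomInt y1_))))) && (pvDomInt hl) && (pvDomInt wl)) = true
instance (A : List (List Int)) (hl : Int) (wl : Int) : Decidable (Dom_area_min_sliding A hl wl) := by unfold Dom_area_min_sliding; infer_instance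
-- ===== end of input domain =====

-- B replaces the two deque sliding-minimum passes with double transposition by a
-- direct per-rectangle minimum in one nested comprehension (objective: simpler; not faster).

-- ===== PORT A =====
-- helper: `while D and L[D[-1]] >= x: D.pop()` (pop from the back = dropWhile on the reverse);
-- Python's L[t] here always sees an in-range non-negative index, ported as pyGetD with default 0
def pvPopBack (L : List Int) (x : Int) (D : List Int) : List Int :=
  (D.reverse.dropWhile (fun t => x ≤ PySem.List.pyGetD L t 0)).reverse

-- one iteration of the `for i, x in enumerate(L)` loop of sliding_min
def pvStep (L : List Int) (K : Int) (st : List Int × List Int) (ix : Int × Int) : List Int × List Int :=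
  let D2 := pvPopBack L ix.2 st.1 ++ [ix.1]
  let D3 := D2.dropWhile (fun t => t ≤ ix.1 - K)
  (D3, st.2 ++ [PySem.List.pyGetD L (D3.headD 0) 0])

def sliding_min (L : List Int) (K : Int) : List Int :=
  PySem.List.slice (((PySem.List.enumerate L 0).foldl (pvStep L K) ([], [])).2) (some (K - 1)) none

-- zip(*rows) ported by hand: truncates to the shortest row, row j of the result collects entry j of every row
def pvZipStar (R : List (List Int)) : List (List Int) :=
  match R with
  | [] => []
  | r :: rs =>
    (List.range (rs.foldl (fun m s => min m s.length) r.length)).map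
      (fun j => (r :: rs).map (fun row => row.getD j 0))

def area_min_sliding (A : List (List Int)) (hl : Int) (wl : Int) : List (List Int) :=
  let res1 := A.map (fun row => sliding_min row wl)
  let res2 := (pvZipStar res1).map (fun row => sliding_min row hl)
  pvZipStar res2

-- ===== PORT B =====
-- min(<nonempty generator>) ported as a fold (the [] branch is unreachable under Pre_)
def pvMinI (l : List Int) : Int :=
  match l with
  | [] => 0
  | v :: vs => vs.foldl min v

-- Python A[i+di][j+dj] always sees in-range non-negative indices under Pre_, ported as pyGetD
def area_min_sliding_alt (A : List (List Int)) (hl : Int) (wl : Int) : List (List Int) :=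
  if A = [] then []
  else
    let H : Int := A.length
    let W : Int := pvMinI (A.map (fun row => (row.length : Int)))
    (PySem.List.pyRange 0 (H - hl + 1) 1).map (fun i =>
      (PySem.List.pyRange 0 (W - wl + 1) 1).map (fun j =>
        pvMinI ((PySem.List.pyRange 0 hl 1).flatMap (fun di =>
          (PySem.List.pyRange 0 wl 1).map (fun dj =>
            PySem.List.pyGetD (PySem.List.pyGetD A (i + di) []) (j + dj) 0)))))

-- ===== PRECONDITION & SPEC =====
-- Pre_ excludes exactly the inputs on which A raises AssertionError: a nonempty grid with
-- wl outside [1, min row length] or hl outside [1, number of rows]; the empty grid is accepted.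
def Pre_area_min_sliding (A : List (List Int)) (hl : Int) (wl : Int) : Prop :=
  A = [] ∨ (1 ≤ wl ∧ 1 ≤ hl ∧ hl ≤ (A.length : Int) ∧ ∀ r ∈ A, wl ≤ (r.length : Int))
instance (A : List (List Int)) (hl : Int) (wl : Int) : Decidable (Pre_area_min_sliding A hl wl) := by
  unfold Pre_area_min_sliding; infer_instance

def pvWitness_area_min_sliding : List (List Int) × Int × Int := ([[1, 2, 3], [4, 0, 6]], 2, 2)

def Spec_area_min_sliding (A : List (List Int)) (hl : Int) (wl : Int) (out : List (List Int)) : Prop := out = area_min_sliding_alt A hl wl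
instance (A : List (List Int)) (hl : Int) (wl : Int) (out : List (List Int)) : Decidable (Spec_area_min_sliding A hl wl out) := by unfold Spec_area_min_sliding; infer_instance

-- ===== CLAIM (what is proved, stated in full; the proofs are below) =====
def Claim_equal_area_min_sliding : Prop := ∀ (A : List (List Int)) (hl : Int) (wl : Int), Dom_area_min_sliding A hl wl → Pre_area_min_sliding A hl wl → Spec_area_min_sliding A hl wl (area_min_sliding A hl wl)

-- ===== LEMMAS AND PROOFS =====

-- abbreviations used only by the proofs
def pvG (L : List Int) (t : Int) : Int := PySem.List.pyGetD L t 0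

-- minimum of the window of width K ending at index i (clamped at 0): the value A's loop appends at step i
def pvCmin (L : List Int) (K i : Int) : Int :=
  pvMinI ((PySem.List.pyRange (max 0 (i + 1 - K)) (i + 1)).map (pvG L))

-- minimum of the window [j, j+K)
def pvWin (L : List Int) (K j : Int) : Int :=
  pvMinI ((PySem.List.pyRange j (j + K)).map (pvG L))

-- minimal row length (Nat form of the fold in pvZipStar)
def pvMlen : List (List Int) → Nat
  | [] => 0
  | r :: rs => rs.foldl (fun m s => min m s.length) r.length

-- the deque invariant of sliding_min, for the state D after processing indices 0..i-1
def pvInv (L : List Int) (K i : Int) (D : List Int) : Prop :=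
  D.Pairwise (· < ·) ∧
  (∀ t ∈ D, 0 ≤ t ∧ i - K ≤ t ∧ t < i) ∧
  D.Pairwise (fun a b => pvG L a < pvG L b) ∧
  (∀ t : Int, 0 ≤ t → i - K ≤ t → t < i → ∃ d ∈ D, t ≤ d ∧ pvG L d ≤ pvG L t)

theorem pvMinI_min? (l : List Int) (h : l ≠ []) : l.min? = some (pvMinI l) := by
  cases l with
  | nil => simp at h
  | cons v vs => rfl

theorem pvMinI_spec (l : List Int) (h : l ≠ []) : pvMinI l ∈ l ∧ ∀ b ∈ l, pvMinI l ≤ b :=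
  List.min?_eq_some_iff.mp (pvMinI_min? l h)

theorem pvMinI_eq_of (l : List Int) (v : Int) (hv : v ∈ l) (hle : ∀ b ∈ l, v ≤ b) :
    pvMinI l = v := by
  have h := pvMinI_spec l (List.ne_nil_of_mem hv)
  exact le_antisymm (h.2 v hv) (hle _ h.1)

theorem pvMinI_flatMap {α : Type} (l : List α) (f : α → List Int) (hl : l ≠ [])
    (hf : ∀ x ∈ l, f x ≠ []) :
    pvMinI (l.flatMap f) = pvMinI (l.map (fun x => pvMinI (f x))) := by
  have hmapne : l.map (fun x => pvMinI (f x)) ≠ [] := by simpa using hl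
  have hspec := pvMinI_spec _ hmapne
  apply pvMinI_eq_of
  · rcases List.mem_map.mp hspec.1 with ⟨x, hx, hvx⟩
    exact List.mem_flatMap.mpr ⟨x, hx, hvx ▸ (pvMinI_spec (f x) (hf x hx)).1⟩
  · intro b hb
    rcases List.mem_flatMap.mp hb with ⟨x, hx, hbx⟩
    calc pvMinI (l.map (fun x => pvMinI (f x))) ≤ pvMinI (f x) :=
          hspec.2 _ (List.mem_map.mpr ⟨x, hx, rfl⟩)
      _ ≤ b := (pvMinI_spec (f x) (hf x hx)).2 b hbx

theorem pv_mem_dropWhile_of_not {α : Type} (p : α → Bool) (l : List α) (a : α)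
    (ha : a ∈ l) (hna : ¬ p a) : a ∈ l.dropWhile p := by
  induction l with
  | nil => simp at ha
  | cons b bs ih =>
    by_cases hb : p b
    · simp only [List.dropWhile_cons, hb, if_pos]
      rcases List.mem_cons.mp ha with h | h
      · exact absurd (h ▸ hb) hna
      · exact ih h
    · simpa [List.dropWhile_cons, hb] using ha

theorem pvStep_main (L : List Int) (K i : Int) (D res : List Int)
    (hK : 1 ≤ K) (hi : 0 ≤ i) (hInv : pvInv L K i D) :
    pvInv L K (i + 1) (pvStep L K (D, res) (i, pvG L i)).1 ∧
    (pvStep L K (D, res) (i, pvG L i)).2 = res ++ [pvCmin L K i] := by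
  obtain ⟨P1, P2, P3, P4⟩ := hInv
  set x := pvG L i with hx
  set p : Int → Bool := fun t => decide (x ≤ pvG L t) with hp
  have hPB : pvPopBack L x D = D.rdropWhile p := rfl
  set D1 := D.rdropWhile p with hD1
  set q : Int → Bool := fun t => decide (t ≤ i - K) with hq
  set D3 := (D1 ++ [i]).dropWhile q with hD3
  have hstep : pvStep L K (D, res) (i, x) = (D3, res ++ [pvG L (D3.headD 0)]) := rfl
  have hsub1 : D1.Sublist D := (List.rdropWhile_prefix p D).sublist
  have hmem1 : ∀ t ∈ D1, 0 ≤ t ∧ i - K ≤ t ∧ t < i := fun t ht => P2 t (hsub1.subset ht)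
  have P1' : D1.Pairwise (· < ·) := P1.sublist hsub1
  have P3' : D1.Pairwise (fun a b => pvG L a < pvG L b) := P3.sublist hsub1
  have hkey : ∀ a ∈ D1, pvG L a < x := by
    intro a ha
    have hne : D1 ≠ [] := List.ne_nil_of_mem ha
    have hlast : pvG L (D1.getLast hne) < x := by
      have h2 := List.rdropWhile_last_not p D hne
      simp only [hp, decide_eq_true_eq, not_le] at h2
      exact h2
    have hdec := List.dropLast_append_getLast hne
    have P3'' : (D1.dropLast ++ [D1.getLast hne]).Pairwise (fun a b => pvG L a < pvG L b) := by
      rw [hdec]; exact P3'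
    have ha' : a ∈ D1.dropLast ++ [D1.getLast hne] := by rw [hdec]; exact ha
    rcases List.mem_append.mp ha' with h | h
    · exact lt_trans ((List.pairwise_append.mp P3'').2.2 a h _ (by simp)) hlast
    · simp only [List.mem_singleton] at h
      exact h ▸ hlast
  have hmem2 : ∀ t ∈ D1 ++ [i], 0 ≤ t ∧ t < i + 1 := by
    intro t ht
    rcases List.mem_append.mp ht with h | h
    · have := hmem1 t h; omega
    · simp only [List.mem_singleton] at h; omega
  have P1two : (D1 ++ [i]).Pairwise (· < ·) := by
    refine List.pairwise_append.mpr ⟨P1', by simp, ?_⟩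
    intro a ha b hb
    simp only [List.mem_singleton] at hb
    exact hb ▸ (hmem1 a ha).2.2
  have P3two : (D1 ++ [i]).Pairwise (fun a b => pvG L a < pvG L b) := by
    refine List.pairwise_append.mpr ⟨P3', by simp, ?_⟩
    intro a ha b hb
    simp only [List.mem_singleton] at hb
    exact hb ▸ hkey a ha
  have hsub3 : D3.Sublist (D1 ++ [i]) := List.dropWhile_sublist q
  have P1n : D3.Pairwise (· < ·) := P1two.sublist hsub3
  have P3n : D3.Pairwise (fun a b => pvG L a < pvG L b) := P3two.sublist hsub3
  have hiD3 : i ∈ D3 := by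
    refine pv_mem_dropWhile_of_not q _ i (by simp) ?_
    simp only [hq, decide_eq_true_eq]
    omega
  have hne3 : D3 ≠ [] := List.ne_nil_of_mem hiD3
  have hh0low : i + 1 - K ≤ D3.head hne3 := by
    have h2 := List.head_dropWhile_not q hne3
    have h3 : ¬ (D3.head hne3 ≤ i - K) := by simpa [hq] using h2
    omega
  have hcons : D3 = D3.head hne3 :: D3.tail := (List.cons_head_tail hne3).symm
  have hheadle : ∀ d ∈ D3, D3.head hne3 ≤ d := by
    intro d hd
    rw [hcons] at hd P1n
    rcases List.mem_cons.mp hd with h | h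
    · omega
    · exact le_of_lt ((List.pairwise_cons.mp P1n).1 d h)
  have hheadval : ∀ d ∈ D3, pvG L (D3.head hne3) ≤ pvG L d := by
    intro d hd
    rw [hcons] at hd P3n
    rcases List.mem_cons.mp hd with h | h
    · rw [h]
    · exact le_of_lt ((List.pairwise_cons.mp P3n).1 d h)
  have P2n : ∀ t ∈ D3, 0 ≤ t ∧ (i + 1) - K ≤ t ∧ t < i + 1 := by
    intro t ht
    have h1 := hmem2 t (hsub3.subset ht)
    have h2 := hheadle t ht
    constructor
    · omega
    constructor
    · omega
    · omega
  have P4n : ∀ t : Int, 0 ≤ t → (i + 1) - K ≤ t → t < i + 1 →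
      ∃ d ∈ D3, t ≤ d ∧ pvG L d ≤ pvG L t := by
    intro t ht0 htlow htup
    by_cases hti : t = i
    · exact ⟨i, hiD3, by omega, by rw [hti]⟩
    · obtain ⟨d, hd, htd, hvd⟩ := P4 t ht0 (by omega) (by omega)
      have hdsplit : d ∈ D1 ∨ p d = true := by
        have hmm : d ∈ D1 ++ D.rtakeWhile p := by
          rw [hD1, List.rdropWhile_append_rtakeWhile]; exact hd
        rcases List.mem_append.mp hmm with h | h
        · exact Or.inl h
        · exact Or.inr (List.mem_rtakeWhile_imp h)
      rcases hdsplit with h | h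
      · have hdq : ¬ (q d = true) := by
          simp only [hq, decide_eq_true_eq]; omega
        exact ⟨d, pv_mem_dropWhile_of_not q _ d (List.mem_append_left _ h) hdq, htd, hvd⟩
      · have hxd : x ≤ pvG L d := by simpa [hp] using h
        exact ⟨i, hiD3, by omega, le_trans hxd hvd⟩
  have hh0mem := P2n _ (hcons ▸ List.mem_cons_self)
  have hval : pvG L (D3.headD 0) = pvCmin L K i := by
    have hheadD : D3.headD 0 = D3.head hne3 := by
      conv_lhs => rw [hcons]
      rfl
    rw [hheadD, pvCmin]
    symm
    apply pvMinI_eq_of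
    · refine List.mem_map.mpr ⟨D3.head hne3, PySem.List.mem_pyRange_one.mpr ⟨?_, ?_⟩, rfl⟩
      · have := hh0mem; omega
      · have := hh0mem; omega
    · intro b hb
      rcases List.mem_map.mp hb with ⟨t, htr, rfl⟩
      have htb := PySem.List.mem_pyRange_one.mp htr
      obtain ⟨d, hd, htd, hvd⟩ := P4n t (by omega) (by omega) (by omega)
      exact le_trans (hheadval d hd) hvd
  rw [hstep]
  exact ⟨⟨P1n, P2n, P3n, P4n⟩, by rw [hval]⟩

theorem pvRun (L : List Int) (K : Int) (hK : 1 ≤ K) :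
    ∀ (m i : Nat), i + m = L.length → ∀ (D res : List Int),
      pvInv L K i D → res = (List.range i).map (fun t : Nat => pvCmin L K (t : Int)) →
      ((PySem.List.enumerate (L.drop i) i).foldl (pvStep L K) (D, res)).2
        = (List.range L.length).map (fun t : Nat => pvCmin L K (t : Int)) := by
  intro m
  induction m with
  | zero =>
    intro i hi D res hInv hres
    have hd : L.drop i = [] := List.drop_eq_nil_iff.mpr (by omega)
    have hi' : i = L.length := by omega
    rw [hd, PySem.List.enumerate_nil, List.foldl_nil]
    rw [hres, hi']
  | succ m ih =>
    intro i hi D res hInv hres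
    have hilt : i < L.length := by omega
    have hdrop : L.drop i = L[i] :: L.drop (i + 1) := List.drop_eq_getElem_cons hilt
    have hxi : L[i] = pvG L (i : Int) := by
      rw [pvG, PySem.List.pyGetD_natCast, List.getD_eq_getElem L 0 hilt]
    rw [hdrop, PySem.List.enumerate_cons, List.foldl_cons, hxi]
    obtain ⟨hInv', hres'⟩ :=
      pvStep_main L K i D res hK (Int.natCast_nonneg i) hInv
    have hcast : ((i : Int) + 1) = ((i + 1 : Nat) : Int) := by push_cast; ring
    have h2 := ih (i + 1) (by omega)
      (pvStep L K (D, res) ((i : Int), pvG L (i : Int))).1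
      (pvStep L K (D, res) ((i : Int), pvG L (i : Int))).2
      (by rw [hcast] at hInv'; exact hInv')
      (by rw [hres', hres, List.range_succ, List.map_append]; rfl)
    rw [Prod.eta] at h2
    rw [hcast]
    exact h2

theorem pvSliding_spec (L : List Int) (K : Int) (hK : 1 ≤ K) (hKn : K ≤ (L.length : Int)) :
    sliding_min L K = (List.range (L.length + 1 - K.toNat)).map (fun j : Nat => pvWin L K (j : Int)) := by
  have h0 : pvInv L K 0 [] := by
    refine ⟨List.Pairwise.nil, by simp, List.Pairwise.nil, ?_⟩
    intro t h1 h2 h3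
    omega
  have hrun := pvRun L K hK L.length 0 (by omega) [] [] h0 (by simp)
  rw [List.drop_zero] at hrun
  rw [sliding_min]
  rw [show ((PySem.List.enumerate L 0).foldl (pvStep L K) ([], [])).2
        = (List.range L.length).map (fun t : Nat => pvCmin L K (t : Int)) from hrun]
  rw [PySem.List.slice_from _ (by omega : (0:Int) ≤ K - 1)]
  rw [← List.map_drop]
  rw [List.range_eq_range', List.drop_range']
  have hk1 : (K - 1).toNat = K.toNat - 1 := by omega
  have hlen : L.length - (K - 1).toNat = L.length + 1 - K.toNat := by omega
  rw [List.range'_eq_map_range, List.map_map]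
  simp only [Nat.zero_add, Nat.mul_one]
  rw [hlen]
  apply List.map_congr_left
  intro j hj
  have hKj : ((K - 1).toNat : Int) = K - 1 := by omega
  have h1 : max 0 ((((K - 1).toNat + j : Nat) : Int) + 1 - K) = (j : Int) := by
    push_cast
    omega
  have h2 : (((K - 1).toNat + j : Nat) : Int) + 1 = (j : Int) + K := by
    push_cast
    omega
  rw [Function.comp_apply, pvCmin, pvWin, h1, h2]

theorem pvMlen_min? (R : List (List Int)) (hR : R ≠ []) :
    (R.map List.length).min? = some (pvMlen R) := by
  cases R with
  | nil => simp at hR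
  | cons r rs => simp [pvMlen, List.min?, List.foldl_map]

theorem pvMlen_spec (R : List (List Int)) (hR : R ≠ []) :
    pvMlen R ∈ R.map List.length ∧ ∀ b ∈ R.map List.length, pvMlen R ≤ b :=
  List.min?_eq_some_iff.mp (pvMlen_min? R hR)

theorem pvZipStar_spec (R : List (List Int)) (hR : R ≠ []) :
    pvZipStar R = (List.range (pvMlen R)).map (fun j => R.map (fun row => row.getD j 0)) := by
  cases R with
  | nil => simp at hR
  | cons r rs => rfl

theorem pvRangeMap {β : Type} (a b : Int) (g : Int → β) :
    (PySem.List.pyRange a b).map g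
      = (List.range (b - a).toNat).map (fun k : Nat => g (a + (k : Int))) := by
  rw [PySem.List.pyRange_one, List.map_map]
  rfl

theorem pvMlen_const (R : List (List Int)) (c : Nat) (hne : R ≠ [])
    (h : ∀ r ∈ R, r.length = c) : pvMlen R = c := by
  rcases List.mem_map.mp (pvMlen_spec R hne).1 with ⟨r, hr, hlen⟩
  rw [← hlen, h r hr]

-- the per-cell fact: B's rectangle minimum = minimum over the column of row-window minima
theorem pvCell (A : List (List Int)) (hl wl i j : Int)
    (hhl : 1 ≤ hl) (hwl : 1 ≤ wl) (hi0 : 0 ≤ i) (hin : i + hl ≤ (A.length : Int)) :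
    pvWin (A.map (fun row => pvWin row wl j)) hl i
      = pvMinI ((PySem.List.pyRange 0 hl).flatMap (fun di =>
          (PySem.List.pyRange 0 wl).map (fun dj =>
            PySem.List.pyGetD (PySem.List.pyGetD A (i + di) []) (j + dj) 0))) := by
  have hrowlist : ∀ (row : List Int),
      (PySem.List.pyRange j (j + wl)).map (pvG row)
        = (PySem.List.pyRange 0 wl).map (fun dj => PySem.List.pyGetD row (j + dj) 0) := by
    intro row
    rw [pvRangeMap, pvRangeMap 0 wl]
    have he : (j + wl - j).toNat = (wl - 0).toNat := by omega
    rw [he]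
    apply List.map_congr_left
    intro k hk
    show pvG row (j + (k : Int)) = PySem.List.pyGetD row (j + (0 + (k : Int))) 0
    rw [pvG, zero_add]
  have hne1 : PySem.List.pyRange 0 hl ≠ [] := by
    apply List.ne_nil_of_length_pos
    rw [PySem.List.length_pyRange_one]
    omega
  rw [pvMinI_flatMap _ _ hne1 (fun x hx => by
    apply List.ne_nil_of_length_pos
    rw [List.length_map, PySem.List.length_pyRange_one]
    omega)]
  rw [pvWin, pvRangeMap, pvRangeMap 0 hl]
  have he : (i + hl - i).toNat = (hl - 0).toNat := by omega
  rw [he]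
  congr 1
  apply List.map_congr_left
  intro k hk
  simp only [zero_add]
  have hkhl : (k : Int) < hl := by
    have := List.mem_range.mp hk
    omega
  have hlt : i + (k : Int) < ((A.map (fun row => pvWin row wl j)).length : Int) := by
    rw [List.length_map]
    omega
  show pvG (A.map (fun row => pvWin row wl j)) (i + (k : Int)) = _
  rw [pvG, PySem.List.pyGetD_eq_getElem _ _ (by omega) hlt, List.getElem_map]
  rw [PySem.List.pyGetD_eq_getElem A _ (by omega : (0:Int) ≤ i + (k : Int))
    (by omega : i + (k : Int) < ((A.length : Int)))]
  rw [pvWin, hrowlist]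


-- ===== VERDICT (by name: the statement is the Claim_ definition above) =====
theorem area_min_sliding_spec : Claim_equal_area_min_sliding := by
  intro A hl wl hDom hPre
  unfold Spec_area_min_sliding
  rcases hPre with hA | ⟨hwl, hhl, hhn, hrow⟩
  · subst hA
    rfl
  · have hAne : A ≠ [] := by
      intro h
      subst h
      simp at hhn
      omega
    -- row pass
    have h1 : A.map (fun row => sliding_min row wl)
        = A.map (fun row => (List.range (row.length + 1 - wl.toNat)).map
            (fun j : Nat => pvWin row wl (j : Int))) :=
      List.map_congr_left (fun row hr => pvSliding_spec row wl hwl (hrow row hr))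
    have h1ne : A.map (fun row => (List.range (row.length + 1 - wl.toNat)).map
        (fun j : Nat => pvWin row wl (j : Int))) ≠ [] := by
      simpa using hAne
    have hkw : wl ≤ (pvMlen A : Int) := by
      rcases List.mem_map.mp (pvMlen_spec A hAne).1 with ⟨r, hr, hlen⟩
      rw [← hlen]
      exact hrow r hr
    have hmA_le : ∀ r ∈ A, pvMlen A ≤ r.length := by
      intro r hr
      exact (pvMlen_spec A hAne).2 r.length (List.mem_map.mpr ⟨r, hr, rfl⟩)
    -- width of the transposed grid
    have hmlen1 : pvMlen (A.map (fun row => (List.range (row.length + 1 - wl.toNat)).map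
        (fun j : Nat => pvWin row wl (j : Int)))) = pvMlen A + 1 - wl.toNat := by
      obtain ⟨hmem1, hle1⟩ := pvMlen_spec _ h1ne
      apply Nat.le_antisymm
      · rcases List.mem_map.mp (pvMlen_spec A hAne).1 with ⟨r0, hr0, hlen0⟩
        refine le_trans (hle1 (r0.length + 1 - wl.toNat) ?_) (by omega)
        refine List.mem_map.mpr ⟨_, List.mem_map.mpr ⟨r0, hr0, rfl⟩, ?_⟩
        simp
      · rcases List.mem_map.mp hmem1 with ⟨row1, hrow1, hlen1⟩
        rcases List.mem_map.mp hrow1 with ⟨r, hr, rfl⟩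
        have hr1 : pvMlen A ≤ r.length := hmA_le r hr
        simp only [List.length_map, List.length_range] at hlen1
        omega
    have h4 : pvZipStar (A.map (fun row => (List.range (row.length + 1 - wl.toNat)).map
          (fun j : Nat => pvWin row wl (j : Int))))
        = (List.range (pvMlen A + 1 - wl.toNat)).map
            (fun j : Nat => A.map (fun row => pvWin row wl (j : Int))) := by
      rw [pvZipStar_spec _ h1ne, hmlen1]
      apply List.map_congr_left
      intro j hj
      rw [List.map_map]
      apply List.map_congr_left
      intro row hr
      show ((List.range (row.length + 1 - wl.toNat)).map
          (fun j : Nat => pvWin row wl (j : Int))).getD j 0 = pvWin row wl (j : Int)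
      apply PySem.List.getD_map_range
      have := hmA_le row hr
      have := List.mem_range.mp hj
      omega
    -- column pass
    have h5 : ((List.range (pvMlen A + 1 - wl.toNat)).map
          (fun j : Nat => A.map (fun row => pvWin row wl (j : Int)))).map
            (fun col => sliding_min col hl)
        = (List.range (pvMlen A + 1 - wl.toNat)).map (fun j : Nat =>
            (List.range (A.length + 1 - hl.toNat)).map (fun idx : Nat =>
              pvWin (A.map (fun row => pvWin row wl (j : Int))) hl (idx : Int))) := by
      rw [List.map_map]
      apply List.map_congr_left
      intro j hj
      have := pvSliding_spec (A.map (fun row => pvWin row wl (j : Int))) hl hhl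
        (by rw [List.length_map]; exact hhn)
      simpa [List.length_map] using this
    have hm1 : 1 ≤ pvMlen A + 1 - wl.toNat := by omega
    have h5ne : (List.range (pvMlen A + 1 - wl.toNat)).map (fun j : Nat =>
        (List.range (A.length + 1 - hl.toNat)).map (fun idx : Nat =>
          pvWin (A.map (fun row => pvWin row wl (j : Int))) hl (idx : Int))) ≠ [] := by
      apply List.ne_nil_of_length_pos
      simp only [List.length_map, List.length_range]
      omega
    have h7 : pvMlen ((List.range (pvMlen A + 1 - wl.toNat)).map (fun j : Nat =>
        (List.range (A.length + 1 - hl.toNat)).map (fun idx : Nat =>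
          pvWin (A.map (fun row => pvWin row wl (j : Int))) hl (idx : Int))))
        = A.length + 1 - hl.toNat := by
      apply pvMlen_const _ _ h5ne
      intro r hr
      rcases List.mem_map.mp hr with ⟨j, hj, rfl⟩
      simp
    -- the A side in closed form
    have hAside : area_min_sliding A hl wl
        = (List.range (A.length + 1 - hl.toNat)).map (fun idx : Nat =>
            (List.range (pvMlen A + 1 - wl.toNat)).map (fun j : Nat =>
              pvWin (A.map (fun row => pvWin row wl (j : Int))) hl (idx : Int))) := by
      show pvZipStar ((pvZipStar (A.map (fun row => sliding_min row wl))).map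
          (fun row => sliding_min row hl)) = _
      rw [h1, h4, h5, pvZipStar_spec _ h5ne, h7]
      apply List.map_congr_left
      intro idx hidx
      rw [List.map_map]
      apply List.map_congr_left
      intro j hj
      show ((List.range (A.length + 1 - hl.toNat)).map (fun idx : Nat =>
          pvWin (A.map (fun row => pvWin row wl (j : Int))) hl (idx : Int))).getD idx 0 = _
      apply PySem.List.getD_map_range
      exact List.mem_range.mp hidx
    -- the B side in the same closed form
    have hW : pvMinI (A.map (fun row => ((row.length : Nat) : Int))) = (pvMlen A : Int) := by
      apply pvMinI_eq_of
      · have hmm : A.map (fun row => ((row.length : Nat) : Int))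
            = (A.map List.length).map (fun c : Nat => (c : Int)) := by
          rw [List.map_map]
          rfl
        rw [hmm]
        exact List.mem_map.mpr ⟨pvMlen A, (pvMlen_spec A hAne).1, rfl⟩
      · intro b hb
        rcases List.mem_map.mp hb with ⟨r, hr, rfl⟩
        exact_mod_cast hmA_le r hr
    have hBside : area_min_sliding_alt A hl wl
        = (List.range (A.length + 1 - hl.toNat)).map (fun idx : Nat =>
            (List.range (pvMlen A + 1 - wl.toNat)).map (fun j : Nat =>
              pvWin (A.map (fun row => pvWin row wl (j : Int))) hl (idx : Int))) := by
      rw [area_min_sliding_alt, if_neg hAne]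
      simp only [hW]
      rw [pvRangeMap 0 ((A.length : Int) - hl + 1)]
      have hN1 : ((A.length : Int) - hl + 1 - 0).toNat = A.length + 1 - hl.toNat := by omega
      rw [hN1]
      apply List.map_congr_left
      intro idx hidx
      rw [pvRangeMap 0 ((pvMlen A : Int) - wl + 1)]
      have hN2 : ((pvMlen A : Int) - wl + 1 - 0).toNat = pvMlen A + 1 - wl.toNat := by omega
      rw [hN2]
      apply List.map_congr_left
      intro j hj
      simp only [zero_add]
      refine (pvCell A hl wl (idx : Int) (j : Int) hhl hwl (by omega) ?_).symm
      have := List.mem_range.mp hidx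
      omega
    rw [hAside, hBside]
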